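-- pv_equiv track=rewrite | github.com/pypi-data/pypi-mirror-403 | packages/just-bash/just_bash-0.1.9-py3-none-any.whl/just_bash/commands/awk/awk.py | _find_regex_end
-- ===== SOURCE A (Python) =====
-- def _find_regex_end(s: str, start: int) -> int:
--     """Find the end of a regex pattern."""
--     pos = start
--     while pos < len(s):
--         if s[pos] == "\\":
--             pos += 2
--         elif s[pos] == "/":
--             return pos
--         else:
--             pos += 1
--     return -1
-- ===== SOURCE B (Python) =====
-- def _find_regex_end(s: str, start: int) -> int:
--     """Find the end of a regex pattern: jump between '/' candidates with str.find and
--     accept the first one preceded by an even-length run of backslashes (clipped at start)."""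
--     begin = start if start >= 0 else max(0, len(s) + start)
--     i = begin
--     while True:
--         p = s.find("/", i)
--         if p == -1:
--             return -1
--         k = p
--         while k > begin and s[k - 1] == "\\":
--             k -= 1
--         if (p - k) % 2 == 0:
--             return p
--         i = p + 1
-- ===== Notes on version B (the rewrite author's own statement) =====
-- stated objective: faster
-- what changed: Replaces A's character-by-character escape-skipping scan by a candidate-jumping algorithm: str.find locates each '/' (a C-level scan) and a backward count of the preceding backslash run (clipped at start) accepts it iff the run length is even.
-- intended difference: For -len(s) <= start < 0 on backslash-free strings containing '/', A wraps the index Python-style and returns a negative position (even -1, colliding with the not-found sentinel) or rescans the prefix, while B interprets start as the clipped offset len(s)+start like str.find and returns the nonnegative position of the first '/' there (or -1), the intended meaning of a start offset; A and B differ on every such input (proved tight). — e.g. on _find_regex_end("/", -1): A returns -1, B returns 0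
-- outside the precondition, e.g. on _find_regex_end('\\/', -1): A returns -1, B returns 1
import Mathlib
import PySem

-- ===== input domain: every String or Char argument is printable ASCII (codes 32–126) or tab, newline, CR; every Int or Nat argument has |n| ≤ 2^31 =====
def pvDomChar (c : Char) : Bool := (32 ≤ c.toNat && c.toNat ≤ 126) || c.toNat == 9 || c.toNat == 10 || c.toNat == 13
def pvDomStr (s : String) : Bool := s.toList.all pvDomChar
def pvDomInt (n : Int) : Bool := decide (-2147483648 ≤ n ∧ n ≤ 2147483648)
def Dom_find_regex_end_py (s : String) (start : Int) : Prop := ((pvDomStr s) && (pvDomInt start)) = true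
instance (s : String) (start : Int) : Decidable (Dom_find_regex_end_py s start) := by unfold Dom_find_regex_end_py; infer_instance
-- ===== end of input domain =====

-- B finds each '/' candidate with a find-style jump (str.find) and accepts it iff the
-- backslash run before it (clipped at start) has even length, instead of A's char-by-char
-- escape-skipping scan; for negative start B clips like str.find where A wraps (stated as D_).


-- ===== PORT A =====
-- while pos < len(s): backslash jumps pos += 2, '/' returns pos, else pos += 1; -1 after the
-- loop.  s[pos] out of range is an IndexError (reachable only when start < -len(s), excluded
-- by Pre_); the port returns 0 there.  The loop is ported with a fuel argument (pos grows by
-- ≥ 1 per step, so fuel (len(s) - start).toNat + 1 at the call site is never exhausted).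
def pvFindLoopA (s : String) : Nat → Int → Int
  | 0, _ => 0
  | fuel + 1, pos =>
    if pos < PySem.Str.len s then
      match PySem.Str.pyGet? s pos with
      | some c =>
        if c = '\\' then pvFindLoopA s fuel (pos + 2)
        else if c = '/' then pos
        else pvFindLoopA s fuel (pos + 1)
      | none => 0
    else -1

def find_regex_end_py (s : String) (start : Int) : Int :=
  pvFindLoopA s ((PySem.Str.len s - start).toNat + 1) start

-- ===== PORT B =====
-- s.find("/", i) for a nonnegative i, hand-ported (exact for a one-char needle and 0 ≤ i):
-- first index j ≥ i with s[j] == '/', else none (= Python's -1).  Fuel-driven scan.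
def pvFindSlash (l : List Char) : Nat → Nat → Option Nat
  | 0, _ => none
  | fuel + 1, i =>
    if h : i < l.length then
      if l[i] = '/' then some i else pvFindSlash l fuel (i + 1)
    else none

-- the call with sufficient fuel
def pvFindSlashC (l : List Char) (i : Nat) : Option Nat := pvFindSlash l (l.length - i + 1) i

-- inner while: k -= 1 while k > begin and s[k-1] == "\\"  (structural on k)
def pvBackRun (l : List Char) (b0 : Nat) : Nat → Nat
  | 0 => 0
  | k + 1 => if b0 < k + 1 ∧ l[k]? = some '\\' then pvBackRun l b0 k else k + 1

-- outer while True: p = s.find("/", i); accept p iff even backslash run, else i = p + 1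
-- (i grows by ≥ 1 per iteration, so fuel len - b0 + 1 at the call site is never exhausted)
def pvFindLoopB (l : List Char) (b0 : Nat) : Nat → Nat → Int
  | 0, _ => 0
  | fuel + 1, i =>
    match pvFindSlashC l i with
    | none => -1
    | some p =>
      let k := pvBackRun l b0 p
      if (p - k) % 2 = 0 then (p : Int) else pvFindLoopB l b0 fuel (p + 1)

-- begin = start if start >= 0 else max(0, len(s) + start)   (Int.toNat is that max)
def find_regex_end_py_alt (s : String) (start : Int) : Int :=
  let l := s.toList
  let b0 : Nat := if 0 ≤ start then start.toNat else ((l.length : Int) + start).toNat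
  pvFindLoopB l b0 (l.length - b0 + 1) b0

-- ===== PRECONDITION & SPEC =====
-- Pre_ excludes (i) the inputs on which A raises IndexError (start < -len(s) makes the first
-- access s[start] out of range) and (ii) negative in-range start on strings containing both
-- '\' and '/', where A's wraparound scan can carry an escape across the wrap boundary — an
-- implementation artefact no caller would specify (B clips the start like str.find there).
def Pre_find_regex_end_py (s : String) (start : Int) : Prop :=
  -(s.length : Int) ≤ start ∧ (0 ≤ start ∨ '\\' ∉ s.toList ∨ '/' ∉ s.toList)

instance (s : String) (start : Int) : Decidable (Pre_find_regex_end_py s start) := by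
  unfold Pre_find_regex_end_py; infer_instance

def pvWitness_find_regex_end_py : String × Int := ("ab\\/c/", 0)

-- For -len(s) ≤ start < 0 on backslash-free strings containing '/', A wraps the index
-- Python-style and returns a negative position (even -1, colliding with the not-found
-- sentinel) or rescans the prefix; B clips start to len(s)+start like str.find and returns
-- the nonnegative position of the first '/' there (or -1), the intended meaning of a start
-- offset.
def D_find_regex_end_py (s : String) (start : Int) : Prop :=
  start < 0 ∧ -(s.length : Int) ≤ start ∧ '/' ∈ s.toList ∧ '\\' ∉ s.toList
instance (s : String) (start : Int) : Decidable (D_find_regex_end_py s start) := by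
  unfold D_find_regex_end_py; infer_instance

def Spec_find_regex_end_py (s : String) (start : Int) (out : Int) : Prop :=
  ¬ D_find_regex_end_py s start → out = find_regex_end_py_alt s start
instance (s : String) (start : Int) (out : Int) : Decidable (Spec_find_regex_end_py s start out) := by unfold Spec_find_regex_end_py; infer_instance

def pvDiffWitness_find_regex_end_py : String × Int := ("/", -1)
def pvDiffWitnessOut_find_regex_end_py : Int × Int := (-1, 0)

-- ===== CLAIM (what is proved, stated in full; the proofs are below) =====
def Claim_unchanged_find_regex_end_py : Prop := ∀ (s : String) (start : Int), Dom_find_regex_end_py s start → Pre_find_regex_end_py s start → Spec_find_regex_end_py s start (find_regex_end_py s start)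
def Claim_changed_find_regex_end_py : Prop := Dom_find_regex_end_py (pvDiffWitness_find_regex_end_py.1) (pvDiffWitness_find_regex_end_py.2) ∧ Pre_find_regex_end_py (pvDiffWitness_find_regex_end_py.1) (pvDiffWitness_find_regex_end_py.2) ∧ D_find_regex_end_py (pvDiffWitness_find_regex_end_py.1) (pvDiffWitness_find_regex_end_py.2) ∧ find_regex_end_py (pvDiffWitness_find_regex_end_py.1) (pvDiffWitness_find_regex_end_py.2) = pvDiffWitnessOut_find_regex_end_py.1 ∧ find_regex_end_py_alt (pvDiffWitness_find_regex_end_py.1) (pvDiffWitness_find_regex_end_py.2) = pvDiffWitnessOut_find_regex_end_py.2 ∧ pvDiffWitnessOut_find_regex_end_py.1 ≠ pvDiffWitnessOut_find_regex_end_py.2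
def Claim_exact_find_regex_end_py : Prop := ∀ (s : String) (start : Int), Dom_find_regex_end_py s start → Pre_find_regex_end_py s start → D_find_regex_end_py s start → find_regex_end_py s start ≠ find_regex_end_py_alt s start

-- ===== LEMMAS AND PROOFS =====

-- A's loop with its canonical (always sufficient) fuel
def pvAF (s : String) (pos : Int) : Int :=
  pvFindLoopA s ((PySem.Str.len s - pos).toNat + 1) pos

-- B's loop with its canonical fuel
def pvBF (l : List Char) (b0 i : Nat) : Int := pvFindLoopB l b0 (l.length - i + 1) i

-- fuel irrelevance for A
theorem pvAF_eq (s : String) : ∀ f, ∀ pos : Int, (PySem.Str.len s - pos).toNat < f →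
    pvFindLoopA s f pos = pvAF s pos := by
  intro f
  induction f using Nat.strong_induction_on with
  | _ f ih =>
    intro pos hf
    match f, hf with
    | g + 1, hf =>
      unfold pvAF
      by_cases hp : pos < PySem.Str.len s
      · have hlen := PySem.Str.len_eq s
        simp only [pvFindLoopA, if_pos hp]
        cases hg : PySem.Str.pyGet? s pos with
        | none => rfl
        | some c =>
          by_cases hb : c = '\\'
          · simp only [hb, if_true]
            rw [ih g (by omega) (pos + 2) (by omega),
                ih ((PySem.Str.len s - pos).toNat) (by omega) (pos + 2) (by omega)]
          · by_cases hs : c = '/'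
            · simp [hs]
            · simp only [if_neg hb, if_neg hs]
              rw [ih g (by omega) (pos + 1) (by omega),
                  ih ((PySem.Str.len s - pos).toNat) (by omega) (pos + 1) (by omega)]
      · simp only [pvFindLoopA, if_neg hp]

-- one-step unfolding of pvAF
theorem pvAF_unfold (s : String) (pos : Int) : pvAF s pos =
    (if pos < PySem.Str.len s then
      match PySem.Str.pyGet? s pos with
      | some c =>
        if c = '\\' then pvAF s (pos + 2)
        else if c = '/' then pos
        else pvAF s (pos + 1)
      | none => 0
    else -1) := by
  have hlen := PySem.Str.len_eq s
  by_cases hp : pos < PySem.Str.len s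
  · rw [if_pos hp]
    rw [show pvAF s pos = pvFindLoopA s ((PySem.Str.len s - pos).toNat + 1) pos from rfl]
    simp only [pvFindLoopA, if_pos hp]
    cases hg : PySem.Str.pyGet? s pos with
    | none => rfl
    | some c =>
      by_cases hb : c = '\\'
      · simp only [hb, if_true]
        rw [pvAF_eq s ((PySem.Str.len s - pos).toNat) (pos + 2) (by omega)]
      · by_cases hs : c = '/'
        · simp [hs]
        · simp only [if_neg hb, if_neg hs]
          rw [pvAF_eq s ((PySem.Str.len s - pos).toNat) (pos + 1) (by omega)]
  · rw [if_neg hp]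
    rw [show pvAF s pos = pvFindLoopA s ((PySem.Str.len s - pos).toNat + 1) pos from rfl]
    simp only [pvFindLoopA, if_neg hp]

-- string indexing at a nonnegative Nat-cast index is list indexing
theorem pvStrGet_nat (s : String) (q : Nat) : PySem.Str.pyGet? s (q : Int) = s.toList[q]? := by
  simp [PySem.Str.pyGet?]

-- in range → pyGet? returns a character
theorem pvGet_isSome (s : String) (pos : Int)
    (h1 : -(s.toList.length : Int) ≤ pos) (h2 : pos < (s.toList.length : Int)) :
    ∃ c, PySem.Str.pyGet? s pos = some c := by
  cases h : PySem.Str.pyGet? s pos with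
  | some c => exact ⟨c, rfl⟩
  | none =>
    exfalso
    have hnone : PySem.List.pyGet? s.toList pos = none := by simpa [PySem.Str.pyGet?] using h
    have := (PySem.List.pyGet?_eq_none_iff (xs := s.toList) (i := pos)).mp hnone
    simp [PySem.Raise.InRange] at this
    rw [← String.length_toList] at this
    omega

-- one unfolding of A's loop at an in-range Nat position
theorem pvA_step (s : String) (q : Nat) (hq : q < s.toList.length) :
    pvAF s (q : Int) =
      (if s.toList[q] = '\\' then pvAF s ((q : Int) + 2)
       else if s.toList[q] = '/' then (q : Int)
       else pvAF s ((q : Int) + 1)) := by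
  rw [pvAF_unfold]
  rw [if_pos (by simp only [PySem.Str.len_eq]; exact_mod_cast hq)]
  rw [pvStrGet_nat, List.getElem?_eq_getElem hq]

-- out of range → -1
theorem pvA_out (s : String) (q : Nat) (hq : s.toList.length ≤ q) :
    pvAF s (q : Int) = -1 := by
  rw [pvAF_unfold]
  rw [if_neg (by simp only [PySem.Str.len_eq]; omega)]

-- A never finds a '/' at or after q (Nat position) → A returns -1
theorem pvA_noslash_nat (s : String) : ∀ n (q : Nat), s.toList.length - q ≤ n →
    (∀ j, q ≤ j → s.toList[j]? ≠ some '/') → pvAF s (q : Int) = -1 := by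
  intro n
  induction n with
  | zero =>
    intro q hn _
    exact pvA_out s q (by omega)
  | succ m ih =>
    intro q hn h
    by_cases hq : q < s.toList.length
    · rw [pvA_step s q hq]
      have hc : s.toList[q] ≠ '/' := by
        have := h q (le_refl _)
        simp [List.getElem?_eq_getElem hq] at this
        exact this
      by_cases h1 : s.toList[q] = '\\'
      · rw [if_pos h1, show (q : Int) + 2 = ((q + 2 : Nat) : Int) by omega]
        exact ih (q + 2) (by omega) (fun j hj => h j (by omega))
      · rw [if_neg h1, if_neg hc, show (q : Int) + 1 = ((q + 1 : Nat) : Int) by omega]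
        exact ih (q + 1) (by omega) (fun j hj => h j (by omega))
    · exact pvA_out s q (by omega)

-- '/' nowhere in s → A from any in-range (possibly negative) position returns -1
theorem pvA_noslash_int (s : String) : ∀ n (pos : Int), ((s.toList.length : Int) - pos).toNat ≤ n →
    -(s.toList.length : Int) ≤ pos → '/' ∉ s.toList → pvAF s pos = -1 := by
  intro n
  induction n with
  | zero =>
    intro pos hn hlo hns
    rw [pvAF_unfold]
    rw [if_neg (by simp only [PySem.Str.len_eq]; omega)]
  | succ m ih =>
    intro pos hn hlo hns
    by_cases hq : pos < (s.toList.length : Int)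
    · obtain ⟨c, hc⟩ := pvGet_isSome s pos hlo hq
      have hmem : c ∈ s.toList := by
        have := PySem.List.mem_of_pyGet?_eq_some (xs := s.toList) (i := pos) (x := c) (by
          simpa [PySem.Str.pyGet?] using hc)
        exact this
      have hcs : c ≠ '/' := fun h => hns (h ▸ hmem)
      rw [pvAF_unfold]
      rw [if_pos (by simp only [PySem.Str.len_eq]; omega), hc]
      by_cases hb : c = '\\'
      · simp only [hb, if_true]
        exact ih (pos + 2) (by omega) (by omega) hns
      · simp only [if_neg hb, if_neg hcs]
        exact ih (pos + 1) (by omega) (by omega) hns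
    · rw [pvAF_unfold]
      rw [if_neg (by simp only [PySem.Str.len_eq]; omega)]

-- A at an in-range '/' returns that position
theorem pvA_at_slash (s : String) (p : Nat) (hp : p < s.toList.length)
    (hc : s.toList[p]? = some '/') : pvAF s (p : Int) = (p : Int) := by
  have hc' : s.toList[p] = '/' := by simpa [List.getElem?_eq_getElem hp] using hc
  rw [pvA_step s p hp, hc']
  simp

-- SKIP: no '/' in [q,r) and no backslash just before r → A(q) = A(r)
theorem pvA_skip (s : String) : ∀ m (q r : Nat), q ≤ r → r - q ≤ m → r ≤ s.toList.length →
    (∀ j, q ≤ j → j < r → s.toList[j]? ≠ some '/') →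
    (r = q ∨ s.toList[r - 1]? ≠ some '\\') →
    pvAF s (q : Int) = pvAF s (r : Int) := by
  intro m
  induction m with
  | zero =>
    intro q r h1 h2 _ _ _
    obtain rfl : q = r := by omega
    rfl
  | succ m ih =>
    intro q r hqr hm hr hns hb
    by_cases heq : q = r
    · subst heq; rfl
    · have hq : q < s.toList.length := by omega
      have hcq : s.toList[q] ≠ '/' := by
        have := hns q (le_refl _) (by omega)
        simp [List.getElem?_eq_getElem hq] at this
        exact this
      rw [pvA_step s q hq]
      by_cases h1 : s.toList[q] = '\\'
      · have h2r : q + 2 ≤ r := by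
          rcases Nat.lt_or_ge (q + 2) (r + 1) with h | h
          · omega
          · have : r = q + 1 := by omega
            exfalso
            rcases hb with hb | hb
            · omega
            · exact hb (by rw [this]; simpa [List.getElem?_eq_getElem hq] using h1)
        rw [if_pos h1, show (q : Int) + 2 = ((q + 2 : Nat) : Int) by omega]
        exact ih (q + 2) r h2r (by omega) hr (fun j hj1 hj2 => hns j (by omega) hj2)
          (Or.inr (hb.resolve_left (fun h => heq h.symm)))
      · rw [if_neg h1, if_neg hcq, show (q : Int) + 1 = ((q + 1 : Nat) : Int) by omega]
        exact ih (q + 1) r (by omega) (by omega) hr (fun j hj1 hj2 => hns j (by omega) hj2)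
          (Or.inr (hb.resolve_left (fun h => heq h.symm)))

-- RUN: an all-backslash block of even length 2m is stepped over in jumps of two
theorem pvA_run (s : String) : ∀ m (k : Nat), k + 2 * m ≤ s.toList.length →
    (∀ j, k ≤ j → j < k + 2 * m → s.toList[j]? = some '\\') →
    pvAF s (k : Int) = pvAF s ((k + 2 * m : Nat) : Int) := by
  intro m
  induction m with
  | zero => intro k _ _; norm_num
  | succ m ih =>
    intro k hlen hbs
    have hk : k < s.toList.length := by omega
    have h1 : s.toList[k] = '\\' := by
      have := hbs k (le_refl _) (by omega)
      simpa [List.getElem?_eq_getElem hk] using this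
    rw [pvA_step s k hk, if_pos h1, show (k : Int) + 2 = ((k + 2 : Nat) : Int) by omega]
    rw [ih (k + 2) (by omega) (fun j hj1 hj2 => hbs j (by omega) (by omega))]
    congr 1
    omega

-- fuel irrelevance for the find scan
theorem pvFS_eq (l : List Char) : ∀ f i, l.length - i < f →
    pvFindSlash l f i = pvFindSlashC l i := by
  intro f
  induction f using Nat.strong_induction_on with
  | _ f ih =>
    intro i hf
    match f, hf with
    | g + 1, hf =>
      unfold pvFindSlashC
      by_cases hi : i < l.length
      · simp only [pvFindSlash, dif_pos hi]
        by_cases hc : l[i] = '/'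
        · simp [hc]
        · simp only [if_neg hc]
          rw [ih g (by omega) (i + 1) (by omega),
              ih (l.length - i) (by omega) (i + 1) (by omega)]
      · simp only [pvFindSlash, dif_neg hi]

-- one-step unfolding of the canonical find scan
theorem pvFSC_unfold (l : List Char) (i : Nat) : pvFindSlashC l i =
    (if h : i < l.length then
      (if l[i] = '/' then some i else pvFindSlashC l (i + 1))
    else none) := by
  by_cases hi : i < l.length
  · rw [dif_pos hi]
    rw [show pvFindSlashC l i = pvFindSlash l (l.length - i + 1) i from rfl]
    simp only [pvFindSlash, dif_pos hi]
    by_cases hc : l[i] = '/'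
    · simp [hc]
    · simp only [if_neg hc]
      rw [pvFS_eq l (l.length - i) (i + 1) (by omega)]
  · rw [dif_neg hi]
    rw [show pvFindSlashC l i = pvFindSlash l (l.length - i + 1) i from rfl]
    simp only [pvFindSlash, dif_neg hi]

-- find spec: a hit is the first '/' at or after i
theorem pvFindSlash_some (l : List Char) : ∀ n i p, l.length - i ≤ n → pvFindSlashC l i = some p →
    i ≤ p ∧ p < l.length ∧ l[p]? = some '/' ∧ ∀ j, i ≤ j → j < p → l[j]? ≠ some '/' := by
  intro n
  induction n with
  | zero =>
    intro i p hn h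
    rw [pvFSC_unfold, dif_neg (by omega)] at h
    simp at h
  | succ m ih =>
    intro i p hn h
    rw [pvFSC_unfold] at h
    by_cases hi : i < l.length
    · rw [dif_pos hi] at h
      by_cases hc : l[i] = '/'
      · rw [if_pos hc] at h
        obtain rfl : i = p := by simpa using h
        exact ⟨le_refl _, hi, by simp [List.getElem?_eq_getElem hi, hc], fun j h1 h2 => absurd h2 (by omega)⟩
      · rw [if_neg hc] at h
        obtain ⟨h1, h2, h3, h4⟩ := ih (i + 1) p (by omega) h
        refine ⟨by omega, h2, h3, fun j hj1 hj2 => ?_⟩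
        by_cases hji : j = i
        · subst hji; simp [List.getElem?_eq_getElem hi, hc]
        · exact h4 j (by omega) hj2
    · rw [dif_neg hi] at h; simp at h

-- a miss means no '/' at or after i
theorem pvFindSlash_none (l : List Char) : ∀ n i, l.length - i ≤ n → pvFindSlashC l i = none →
    ∀ j, i ≤ j → l[j]? ≠ some '/' := by
  intro n
  induction n with
  | zero =>
    intro i hn _ j hij
    have : l.length ≤ j := by omega
    simp [List.getElem?_eq_none this]
  | succ m ih =>
    intro i hn h j hij
    rw [pvFSC_unfold] at h
    by_cases hi : i < l.length
    · rw [dif_pos hi] at h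
      by_cases hc : l[i] = '/'
      · rw [if_pos hc] at h; simp at h
      · rw [if_neg hc] at h
        by_cases hji : j = i
        · subst hji; simp [List.getElem?_eq_getElem hi, hc]
        · exact ih (i + 1) (by omega) h j (by omega)
    · have : l.length ≤ j := by omega
      simp [List.getElem?_eq_none this]

-- no '/' anywhere → the find scan finds nothing
theorem pvFindSlash_of_not_mem (l : List Char) (h : '/' ∉ l) (i : Nat) :
    pvFindSlashC l i = none := by
  cases hfs : pvFindSlashC l i with
  | none => rfl
  | some p =>
    obtain ⟨_, _, hpc, _⟩ := pvFindSlash_some l l.length i p (by omega) hfs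
    exact absurd (List.mem_of_getElem? hpc) h

-- pvBackRun spec: result r with b0 ≤ r ≤ k, all of [r,k) backslashes, boundary clean
theorem pvBackRun_spec (l : List Char) (b0 : Nat) : ∀ k, b0 ≤ k →
    b0 ≤ pvBackRun l b0 k ∧ pvBackRun l b0 k ≤ k ∧
    (∀ j, pvBackRun l b0 k ≤ j → j < k → l[j]? = some '\\') ∧
    (pvBackRun l b0 k = b0 ∨ l[pvBackRun l b0 k - 1]? ≠ some '\\') := by
  intro k
  induction k with
  | zero =>
    intro hbk
    simp only [pvBackRun]
    exact ⟨by omega, le_refl _, fun j hj1 hj2 => absurd hj2 (by omega), Or.inl (by omega)⟩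
  | succ k ih =>
    intro hbk
    by_cases hg : b0 < k + 1 ∧ l[k]? = some '\\'
    · rw [show pvBackRun l b0 (k + 1) = pvBackRun l b0 k by simp only [pvBackRun, if_pos hg]]
      obtain ⟨r1, r2, r3, r4⟩ := ih (by omega)
      refine ⟨r1, by omega, fun j hj1 hj2 => ?_, r4⟩
      by_cases hjk : j = k
      · subst hjk; exact hg.2
      · exact r3 j hj1 (by omega)
    · rw [show pvBackRun l b0 (k + 1) = k + 1 by simp only [pvBackRun, if_neg hg]]
      rw [not_and] at hg
      refine ⟨hbk, le_refl _, fun j hj1 hj2 => absurd hj2 (by omega), ?_⟩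
      by_cases hb : b0 < k + 1
      · exact Or.inr (by simpa using hg hb)
      · exact Or.inl (by omega)

-- fuel irrelevance for B's outer loop
theorem pvBF_eq (l : List Char) (b0 : Nat) : ∀ f i, l.length - i < f →
    pvFindLoopB l b0 f i = pvBF l b0 i := by
  intro f
  induction f using Nat.strong_induction_on with
  | _ f ih =>
    intro i hf
    match f, hf with
    | g + 1, hf =>
      unfold pvBF
      cases hfs : pvFindSlashC l i with
      | none => simp only [pvFindLoopB, hfs]
      | some p =>
        obtain ⟨hip, hplen, _, _⟩ := pvFindSlash_some l l.length i p (by omega) hfs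
        simp only [pvFindLoopB, hfs]
        by_cases hmod : (p - pvBackRun l b0 p) % 2 = 0
        · simp [hmod]
        · simp only [if_neg hmod]
          rw [ih g (by omega) (p + 1) (by omega),
              ih (l.length - i) (by omega) (p + 1) (by omega)]

-- unfolding lemmas for B's candidate loop
theorem pvB_none (l : List Char) (b0 i : Nat) (h : pvFindSlashC l i = none) :
    pvBF l b0 i = -1 := by
  unfold pvBF
  simp only [pvFindLoopB, h]

theorem pvB_some (l : List Char) (b0 i p : Nat) (h : pvFindSlashC l i = some p) :
    pvBF l b0 i =
      (if (p - pvBackRun l b0 p) % 2 = 0 then (p : Int) else pvBF l b0 (p + 1)) := by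
  obtain ⟨hip, hplen, _, _⟩ := pvFindSlash_some l l.length i p (by omega) h
  rw [show pvBF l b0 i = pvFindLoopB l b0 (l.length - i + 1) i from rfl]
  simp only [pvFindLoopB, h]
  by_cases hmod : (p - pvBackRun l b0 p) % 2 = 0
  · simp [hmod]
  · simp only [if_neg hmod]
    rw [pvBF_eq l b0 (l.length - i) (p + 1) (by omega)]

-- MAIN: A's scan from a clean nonnegative position i ≥ b0 equals B's candidate loop at i
theorem pvMain (s : String) : ∀ n (b0 i : Nat), b0 ≤ i → s.toList.length - i ≤ n →
    (i = b0 ∨ s.toList[i - 1]? ≠ some '\\') →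
    pvAF s (i : Int) = pvBF s.toList b0 i := by
  intro n
  induction n with
  | zero =>
    intro b0 i _ hn _
    rw [pvB_none _ _ _ (by rw [pvFSC_unfold, dif_neg (by omega)])]
    exact pvA_out s i (by omega)
  | succ m ih =>
    intro b0 i hbi hn hH
    cases hfs : pvFindSlashC s.toList i with
    | none =>
      rw [pvB_none _ _ _ hfs]
      exact pvA_noslash_nat s s.toList.length i (by omega)
        (pvFindSlash_none s.toList s.toList.length i (by omega) hfs)
    | some p =>
      obtain ⟨hip, hplen, hpc, hnos⟩ := pvFindSlash_some s.toList s.toList.length i p (by omega) hfs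
      obtain ⟨hk1, hk2, hrun, hbnd⟩ := pvBackRun_spec s.toList b0 p (by omega)
      set k := pvBackRun s.toList b0 p with hkdef
      have hik : i ≤ k := by
        by_contra hki
        have hi1 : 1 ≤ i := by omega
        have hbsl : s.toList[i - 1]? = some '\\' := hrun (i - 1) (by omega) (by omega)
        rcases hH with hH | hH
        · omega
        · exact hH hbsl
      have hAk : pvAF s (i : Int) = pvAF s (k : Int) :=
        pvA_skip s (k - i) i k hik (by omega) (by omega)
          (fun j hj1 hj2 => hnos j hj1 (by omega))
          (by
            rcases hbnd with hbnd | hbnd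
            · exact Or.inl (by omega)
            · exact Or.inr hbnd)
      rw [pvB_some _ _ _ _ hfs, ← hkdef]
      by_cases hmod : (p - k) % 2 = 0
      · rw [if_pos hmod, hAk]
        have hpk : k + 2 * ((p - k) / 2) = p := by omega
        rw [pvA_run s ((p - k) / 2) k (by omega)
          (fun j hj1 hj2 => hrun j hj1 (by omega)), hpk]
        exact pvA_at_slash s p hplen hpc
      · rw [if_neg hmod, hAk]
        have hklt : k < p := by omega
        have hpk : k + 2 * ((p - k) / 2) = p - 1 := by omega
        rw [pvA_run s ((p - k) / 2) k (by omega)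
          (fun j hj1 hj2 => hrun j hj1 (by omega)), hpk]
        have hbsl : s.toList[p - 1] = '\\' := by
          have := hrun (p - 1) (by omega) (by omega)
          simpa [List.getElem?_eq_getElem (show p - 1 < s.toList.length by omega)] using this
        rw [pvA_step s (p - 1) (by omega), if_pos hbsl,
          show ((p - 1 : Nat) : Int) + 2 = ((p + 1 : Nat) : Int) by omega]
        exact ih b0 (p + 1) (by omega) (by omega)
          (Or.inr (by
            intro hcontra
            rw [show p + 1 - 1 = p from rfl, hpc] at hcontra
            simp at hcontra))


-- negative in-range index: Python wraparound reads position len + pos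
theorem pvGet_neg (s : String) (pos : Int) (h1 : -(s.toList.length : Int) ≤ pos)
    (h2 : pos < 0) :
    PySem.Str.pyGet? s pos = s.toList[((s.toList.length : Int) + pos).toNat]? := by
  have hk : pos = -(((-pos).toNat : Nat) : Int) := by omega
  rw [hk]
  rw [show PySem.Str.pyGet? s (-(((-pos).toNat : Nat) : Int)) =
      PySem.List.pyGet? s.toList (-(((-pos).toNat : Nat) : Int)) from by simp [PySem.Str.pyGet?]]
  rw [PySem.List.pyGet?_neg_natCast (xs := s.toList) (k := (-pos).toNat) (by omega)
      (by omega)]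
  congr 1
  omega

-- without backslashes the backward run is empty
theorem pvBackRun_nobs (l : List Char) (b0 k : Nat) (h : '\\' ∉ l) :
    pvBackRun l b0 k = k := by
  cases k with
  | zero => rfl
  | succ k =>
    rw [show pvBackRun l b0 (k + 1) = k + 1 by
      simp only [pvBackRun]
      rw [if_neg]
      intro ⟨_, hc⟩
      exact h (List.mem_of_getElem? hc)]

-- '/' present → the find scan from 0 hits
theorem pvFSC_of_mem (l : List Char) (h : '/' ∈ l) : pvFindSlashC l 0 ≠ none := by
  intro hn
  obtain ⟨j, hj, hgj⟩ := List.getElem_of_mem h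
  exact pvFindSlash_none l l.length 0 (by omega) hn j (by omega)
    (by simp [List.getElem?_eq_getElem hj, hgj])

-- A from a negative in-range position on a backslash-free string: first '/' in the wrapped
-- window gives its negative position; otherwise the scan falls through to position 0
theorem pvA_neg (s : String) : ∀ n, ∀ pos : Int, (-pos).toNat ≤ n →
    -(s.toList.length : Int) ≤ pos → pos < 0 → '\\' ∉ s.toList →
    pvAF s pos = (match pvFindSlashC s.toList (((s.toList.length : Int) + pos).toNat) with
      | some p => (p : Int) - s.toList.length
      | none => pvAF s 0) := by
  intro n
  induction n with
  | zero => intro pos hn _ h2 _; omega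
  | succ m ih =>
    intro pos hn h1 h2 hnb
    have hlen := PySem.Str.len_eq s
    have hget := pvGet_neg s pos h1 h2
    generalize hjdef : (((s.toList.length : Int) + pos).toNat) = j
    have hj : j < s.toList.length := by omega
    rw [hjdef, List.getElem?_eq_getElem hj] at hget
    have hc : s.toList[j] ≠ '\\' := fun hc => hnb (hc ▸ List.getElem_mem hj)
    rw [pvAF_unfold, if_pos (by omega)]
    simp only [hget]
    rw [if_neg hc]
    by_cases hs : s.toList[j] = '/'
    · rw [if_pos hs]
      have hsome : pvFindSlashC s.toList j = some j := by
        rw [pvFSC_unfold, dif_pos hj, if_pos hs]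
      simp only [hsome]
      have hx : pos = (j : Int) - (s.toList.length : Int) := by omega
      exact hx
    · rw [if_neg hs]
      have hnext : pvFindSlashC s.toList j = pvFindSlashC s.toList (j + 1) := by
        rw [pvFSC_unfold, dif_pos hj, if_neg hs]
      rw [hnext]
      by_cases hp1 : pos + 1 < 0
      · rw [ih (pos + 1) (by omega) (by omega) hp1 hnb]
        rw [show (((s.toList.length : Int) + (pos + 1)).toNat) = j + 1 by omega]
      · have hnone : pvFindSlashC s.toList (j + 1) = none := by
          rw [show j + 1 = s.toList.length by omega, pvFSC_unfold, dif_neg (by omega)]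
        simp only [hnone]
        rw [show pos + 1 = (0 : Int) by omega]

-- ===== VERDICT (by name: the statements are the Claim_ definitions above) =====
theorem find_regex_end_py_spec : Claim_unchanged_find_regex_end_py := by
  intro s start _ hpre
  unfold Spec_find_regex_end_py
  intro hnD
  unfold Pre_find_regex_end_py at hpre
  unfold D_find_regex_end_py at hnD
  obtain ⟨hpre, hside⟩ := hpre
  rw [show find_regex_end_py s start = pvAF s start from rfl,
      show find_regex_end_py_alt s start =
        pvBF s.toList (if 0 ≤ start then start.toNat else ((s.toList.length : Int) + start).toNat)
          (if 0 ≤ start then start.toNat else ((s.toList.length : Int) + start).toNat) from rfl]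
  by_cases hs : 0 ≤ start
  · simp only [if_pos hs]
    conv_lhs => rw [show start = ((start.toNat : Nat) : Int) from (Int.toNat_of_nonneg hs).symm]
    exact pvMain s s.toList.length start.toNat start.toNat (le_refl _) (by omega) (Or.inl rfl)
  · simp only [if_neg hs]
    have hmem : '/' ∉ s.toList := by
      intro hm
      rcases hside with hside | hside | hside
      · omega
      · exact hnD ⟨by omega, hpre, hm, hside⟩
      · exact hside hm
    rw [pvB_none _ _ _ (pvFindSlash_of_not_mem _ hmem _)]
    exact pvA_noslash_int s ((s.toList.length : Int) - start).toNat start (le_refl _)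
      (by rw [String.length_toList]; exact hpre) hmem

theorem find_regex_end_py_changed : Claim_changed_find_regex_end_py := by
  unfold Claim_changed_find_regex_end_py
  exact ⟨by decide, by decide, by decide, by decide, by decide, by decide⟩

theorem find_regex_end_py_tight : Claim_exact_find_regex_end_py := by
  intro s start _ _ hD
  unfold D_find_regex_end_py at hD
  obtain ⟨hneg, hlo, hmem, hnb⟩ := hD
  have hlen0 : 0 < s.toList.length := List.length_pos_of_mem hmem
  have hlo' : -(s.toList.length : Int) ≤ start := by rw [String.length_toList]; exact hlo
  rw [show find_regex_end_py s start = pvAF s start from rfl,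
      show find_regex_end_py_alt s start =
        pvBF s.toList (if 0 ≤ start then start.toNat else ((s.toList.length : Int) + start).toNat)
          (if 0 ≤ start then start.toNat else ((s.toList.length : Int) + start).toNat) from rfl]
  rw [if_neg (by omega)]
  rw [pvA_neg s (-start).toNat start (le_refl _) hlo' hneg hnb]
  cases hfs : pvFindSlashC s.toList (((s.toList.length : Int) + start).toNat) with
  | some p =>
    rw [pvB_some s.toList _ _ p hfs, pvBackRun_nobs s.toList _ p hnb]
    simp only [Nat.sub_self, Nat.zero_mod, if_true]
    have hx : (p : Int) - (s.toList.length : Int) ≠ (p : Int) := by omega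
    exact hx
  | none =>
    rw [pvB_none s.toList _ _ hfs]
    show pvAF s 0 ≠ -1
    cases hfs0 : pvFindSlashC s.toList 0 with
    | none => exact absurd hfs0 (pvFSC_of_mem s.toList hmem)
    | some p0 =>
      rw [show pvAF s 0 = pvAF s ((0 : Nat) : Int) from rfl,
          pvMain s s.toList.length 0 0 (le_refl _) (by omega) (Or.inl rfl),
          pvB_some s.toList 0 0 p0 hfs0, pvBackRun_nobs s.toList 0 p0 hnb]
      simp only [Nat.sub_self, Nat.zero_mod, if_true]
      have hx : ((p0 : Nat) : Int) ≠ -1 := by omega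
      exact hx
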